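-- pv_equiv track=rewrite | github.com/panorb/gti-boolean-simplification | notebook/simplify.py | isolate_var_names
-- ===== SOURCE A (Python) =====
-- reserved_symbols = ['(', ')', '+', '*', '!']
--
-- def isolate_var_names(equation):
--     var_names = []
--     cur_var = ""
--
--     for i in range(len(equation)):
--         c = equation[i]
--         if (c not in reserved_symbols):
--             cur_var += c
--         if (c in reserved_symbols or i == len(equation) - 1) and len(cur_var) > 0:
--             if cur_var not in var_names:
--                 var_names.append(cur_var)
--             cur_var = ""
--
--     var_names.sort()
--     return var_names
-- ===== SOURCE B (Python) =====
-- import re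
--
--
-- def isolate_var_names(equation):
--     # Tokenize in one shot: maximal runs of non-reserved characters,
--     # dedupe with a set (A's first-occurrence order is erased by the sort anyway).
--     return sorted(set(re.findall(r'[^()+*!]+', equation)))
-- ===== Notes on version B (the rewrite author's own statement) =====
-- stated objective: faster
-- what changed: Replaced the index-driven char-by-char accumulator state machine (with in-loop first-occurrence dedup via list membership) by one-shot regex tokenization of maximal non-reserved runs, hash-set dedup, and a final sort.
import Mathlib
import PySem

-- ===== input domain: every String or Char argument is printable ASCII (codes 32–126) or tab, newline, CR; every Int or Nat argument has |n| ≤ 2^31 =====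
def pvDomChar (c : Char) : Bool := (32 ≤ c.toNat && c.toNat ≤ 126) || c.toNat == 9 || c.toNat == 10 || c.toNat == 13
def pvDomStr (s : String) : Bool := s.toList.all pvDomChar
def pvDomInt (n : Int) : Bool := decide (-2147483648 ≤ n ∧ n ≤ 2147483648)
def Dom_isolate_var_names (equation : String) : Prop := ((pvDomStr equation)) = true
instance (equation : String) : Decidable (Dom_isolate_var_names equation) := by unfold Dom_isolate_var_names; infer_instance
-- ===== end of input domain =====

-- B replaces A's char-by-char state machine (with in-loop list-membership dedup) by
-- one-shot tokenization into maximal non-reserved runs, set dedup, and a final sort (idiomatic).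

-- ===== PORT A =====
-- reserved_symbols (a list of 1-char strings in Python; membership of a 1-char string is char membership)
def pvReserved : List Char := ['(', ')', '+', '*', '!']

-- one iteration of A's for-loop; state = (var_names, cur_var as its char list); ic = (i, equation[i])
def pvStepA (n : Nat) (st : List String × List Char) (ic : Int × Char) : List String × List Char :=
  let cur1 := if ic.2 ∈ pvReserved then st.2 else st.2 ++ [ic.2]
  if (ic.2 ∈ pvReserved ∨ ic.1 = (n : Int) - 1) ∧ cur1.length > 0 then
    ((if String.mk cur1 ∈ st.1 then st.1 else st.1 ++ [String.mk cur1]), [])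
  else (st.1, cur1)

def isolate_var_names (equation : String) : List String :=
  let st := (PySem.List.enumerate equation.toList 0).foldl (pvStepA equation.toList.length) ([], [])
  PySem.List.sorted st.1 (fun x => x) false

-- ===== PORT B =====
-- hand port of re.findall(r'[^()+*!]+', equation): the maximal runs of non-reserved
-- characters, in order (exact for this pattern: each match is a maximal non-reserved run)
def pvTokens (acc : List Char) : List Char → List String
  | [] => if acc = [] then [] else [String.mk acc]
  | c :: cs =>
    if c ∈ pvReserved then
      (if acc = [] then pvTokens [] cs else String.mk acc :: pvTokens [] cs)
    else pvTokens (acc ++ [c]) cs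

def isolate_var_names_alt (equation : String) : List String :=
  PySem.List.sorted (PySem.Set.ofList (pvTokens [] equation.toList)) (fun x => x) false

-- ===== PRECONDITION & SPEC =====
def Spec_isolate_var_names (equation : String) (out : List String) : Prop := out = isolate_var_names_alt equation
instance (equation : String) (out : List String) : Decidable (Spec_isolate_var_names equation out) := by unfold Spec_isolate_var_names; infer_instance

-- ===== CLAIM (what is proved, stated in full; the proofs are below) =====
def Claim_equal_isolate_var_names : Prop := ∀ (equation : String), Dom_isolate_var_names equation → Spec_isolate_var_names equation (isolate_var_names equation)

-- ===== LEMMAS AND PROOFS =====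

lemma pvSet_add_eq (names : List String) (x : String) :
    PySem.Set.add names x = if x ∈ names then names else names ++ [x] := by
  simp [PySem.Set.add]

-- the loop invariant: running A's loop over the suffix cs (indices from i) extends
-- var_names by first-occurrence insertion of the tokens of cur ++ cs
lemma pvLoopA_eq (n : Nat) (cs : List Char) : ∀ (acc : List Char) (names : List String) (i : Nat),
    i + cs.length = n → (cs ≠ [] ∨ acc = []) →
    ((PySem.List.enumerate cs (i : Int)).foldl (pvStepA n) (names, acc)).1
      = List.foldl PySem.Set.add names (pvTokens acc cs) := by
  induction cs with
  | nil =>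
    intro acc names i h hside
    rcases hside with h' | h'
    · exact absurd rfl h'
    · subst h'
      simp [PySem.List.enumerate_nil, pvTokens]
  | cons c rest ih =>
    intro acc names i h hside
    rw [PySem.List.enumerate_cons, List.foldl_cons]
    by_cases hc : c ∈ pvReserved
    · by_cases ha : acc = []
      · subst ha
        have hstep : pvStepA n (names, ([] : List Char)) ((i : Int), c) = (names, []) := by
          simp [pvStepA, hc]
        rw [hstep]
        have hrec := ih [] names (i + 1) (by simp at h ⊢; omega) (Or.inr rfl)
        rw [show ((i : Int) + 1) = (((i + 1 : Nat)) : Int) by push_cast; ring]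
        rw [hrec]
        simp [pvTokens, hc]
      · have hstep : pvStepA n (names, acc) ((i : Int), c)
            = ((if String.mk acc ∈ names then names else names ++ [String.mk acc]), []) := by
          have hlen : acc.length > 0 := List.length_pos_of_ne_nil ha
          simp [pvStepA, hc, hlen]
        rw [hstep]
        have hrec := ih [] (if String.mk acc ∈ names then names else names ++ [String.mk acc])
          (i + 1) (by simp at h ⊢; omega) (Or.inr rfl)
        rw [show ((i : Int) + 1) = (((i + 1 : Nat)) : Int) by push_cast; ring]
        rw [hrec]
        simp [pvTokens, hc, ha, pvSet_add_eq]
    · cases rest with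
      | nil =>
        have hi : (i : Int) = (n : Int) - 1 := by
          simp at h; omega
        have hstep : pvStepA n (names, acc) ((i : Int), c)
            = ((if String.mk (acc ++ [c]) ∈ names then names else names ++ [String.mk (acc ++ [c])]), []) := by
          simp [pvStepA, hc, hi]
        rw [hstep]
        simp [PySem.List.enumerate_nil, pvTokens, hc, pvSet_add_eq]
      | cons r rs =>
        have hi : ¬ ((i : Int) = (n : Int) - 1) := by
          simp at h; omega
        have hstep : pvStepA n (names, acc) ((i : Int), c) = (names, acc ++ [c]) := by
          simp [pvStepA, hc, hi]
        rw [hstep]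
        have hrec := ih (acc ++ [c]) names (i + 1) (by simp at h ⊢; omega) (Or.inl (by simp))
        rw [show ((i : Int) + 1) = (((i + 1 : Nat)) : Int) by push_cast; ring]
        rw [hrec]
        simp [pvTokens, hc]

-- ===== VERDICT (by name: the statement is the Claim_ definition above) =====
theorem isolate_var_names_spec : Claim_equal_isolate_var_names := by
  intro equation _
  show isolate_var_names equation = isolate_var_names_alt equation
  unfold isolate_var_names isolate_var_names_alt
  have h := pvLoopA_eq equation.toList.length equation.toList [] [] 0 (by simp) (Or.inr rfl)
  rw [show ((0 : Nat) : Int) = (0 : Int) by simp] at h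
  simp only [h, PySem.Set.ofList, PySem.Set.empty]
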